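-- pv_equiv track=rewrite | github.com/PawelBdev/Studia-AiP | ZADANIA_DOMOWE/zestaw_7/z7_13.py | zwroc_napis_z_samoglosek_na_parzystych
-- ===== SOURCE A (Python) =====
-- def czy_samogloska(znak):
--     return True if znak in "aeiouyąęAEIOUYĄĘ" else False
--
-- def zwroc_napis_z_samoglosek_na_parzystych(napis):
--     licznik = 0
--     nowy_napis = ""
--     for n in napis:
--         licznik += 1
--         if licznik % 2 == 0 and czy_samogloska(n):
--             nowy_napis += n
--     return nowy_napis
-- ===== SOURCE B (Python) =====
-- VOWELS = "aeiouyąęAEIOUYĄĘ"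
--
-- def zwroc_napis_z_samoglosek_na_parzystych(napis):
--     return ''.join(c for c in napis[1::2] if c in VOWELS)
-- ===== Notes on version B (the rewrite author's own statement) =====
-- stated objective: idiomatic
-- what changed: Replaces the explicit counter loop with a parity test and string += by a stride slice napis[1::2] that selects exactly the even 1-based positions, filtered for vowels and joined once.
import Mathlib
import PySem

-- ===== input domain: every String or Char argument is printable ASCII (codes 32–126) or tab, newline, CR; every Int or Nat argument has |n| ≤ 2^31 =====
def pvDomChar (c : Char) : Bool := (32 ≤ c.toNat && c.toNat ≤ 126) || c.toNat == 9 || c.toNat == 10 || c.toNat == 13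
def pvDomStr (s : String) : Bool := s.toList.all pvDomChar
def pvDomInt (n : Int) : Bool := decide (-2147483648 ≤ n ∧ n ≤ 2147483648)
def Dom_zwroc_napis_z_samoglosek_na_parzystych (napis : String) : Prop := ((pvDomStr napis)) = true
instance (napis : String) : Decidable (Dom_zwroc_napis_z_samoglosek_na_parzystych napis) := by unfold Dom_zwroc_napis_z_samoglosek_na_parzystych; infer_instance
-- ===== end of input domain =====

-- B replaces A's counter loop with a parity branch by a stride slice napis[1::2] filtered for vowels (idiomatic decomposition).

-- ===== PORT A =====
def czy_samogloska (znak : Char) : Bool :=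
  if PySem.Str.isIn (String.ofList [znak]) "aeiouyąęAEIOUYĄĘ" then true else false

def zwroc_napis_z_samoglosek_na_parzystych (napis : String) : String :=
  let r := napis.toList.foldl
    (fun (st : Int × List Char) n =>
      let licznik := st.1 + 1
      if PySem.Int.mod licznik 2 == 0 && czy_samogloska n then (licznik, st.2 ++ [n])
      else (licznik, st.2))
    (0, [])
  String.ofList r.2

-- ===== PORT B =====
def zwroc_napis_z_samoglosek_na_parzystych_alt (napis : String) : String :=
  -- napis[1::2]; step 2 ≠ 0 so slice? is always some, getD "" only totalises
  let s := (PySem.Str.slice? napis (some 1) none 2).getD ""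
  String.ofList (s.toList.filter (fun c => PySem.Str.isIn (String.ofList [c]) "aeiouyąęAEIOUYĄĘ"))

-- ===== PRECONDITION & SPEC =====
def Spec_zwroc_napis_z_samoglosek_na_parzystych (napis : String) (out : String) : Prop := out = zwroc_napis_z_samoglosek_na_parzystych_alt napis
instance (napis : String) (out : String) : Decidable (Spec_zwroc_napis_z_samoglosek_na_parzystych napis out) := by unfold Spec_zwroc_napis_z_samoglosek_na_parzystych; infer_instance

-- ===== CLAIM (what is proved, stated in full; the proofs are below) =====
def Claim_equal_zwroc_napis_z_samoglosek_na_parzystych : Prop := ∀ (napis : String), Dom_zwroc_napis_z_samoglosek_na_parzystych napis → Spec_zwroc_napis_z_samoglosek_na_parzystych napis (zwroc_napis_z_samoglosek_na_parzystych napis)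

-- ===== LEMMAS AND PROOFS =====

-- the characters at odd 0-based indices (Python's even 1-based positions)
def pvOdd {α : Type} : List α → List α
  | [] => []
  | [_] => []
  | _ :: b :: t => b :: pvOdd t

theorem pvFoldA (cs : List Char) :
    ∀ (k : Int) (acc : List Char), (2 : Int) ∣ k →
      (cs.foldl
        (fun (st : Int × List Char) n =>
          let licznik := st.1 + 1
          if PySem.Int.mod licznik 2 == 0 && czy_samogloska n then (licznik, st.2 ++ [n])
          else (licznik, st.2))
        (k, acc)).2 = acc ++ (pvOdd cs).filter czy_samogloska := by
  induction cs using pvOdd.induct with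
  | case1 => intro k acc hk; simp [pvOdd]
  | case2 a =>
    intro k acc hk
    have h1 : ¬ ((2 : Int) ∣ k + 1) := by omega
    simp [pvOdd, List.foldl, h1]
  | case3 a b t ih =>
    intro k acc hk
    have h1 : ¬ ((2 : Int) ∣ k + 1) := by omega
    have h2 : (2 : Int) ∣ k + 1 + 1 := by omega
    have c1 : (PySem.Int.mod (k + 1) 2 == 0 && czy_samogloska a) = false := by
      simp [h1]
    have c2 : (PySem.Int.mod (k + 1 + 1) 2 == 0) = true := by
      simp [h2]
    simp only [List.foldl, c1, c2, Bool.true_and, Bool.false_eq_true, if_false]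
    by_cases hv : czy_samogloska b = true
    · rw [if_pos hv, ih (k + 1 + 1) (acc ++ [b]) h2, pvOdd]
      simp [List.filter, hv]
    · rw [if_neg hv, ih (k + 1 + 1) acc h2, pvOdd]
      rw [Bool.not_eq_true] at hv
      simp [List.filter, hv]

theorem pvRangeOdd {α : Type} (xs : List α) :
    (List.range (xs.length / 2)).filterMap (fun k => xs[1 + 2 * k]?) = pvOdd xs := by
  induction xs using pvOdd.induct with
  | case1 => simp [pvOdd]
  | case2 a => simp [pvOdd]
  | case3 a b t ih =>
    have hlen : (a :: b :: t).length / 2 = t.length / 2 + 1 := by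
      simp [List.length]; omega
    rw [hlen, List.range_succ_eq_map]
    simp only [List.filterMap_cons, List.filterMap_map]
    have h0 : (a :: b :: t)[1 + 2 * 0]? = some b := by simp
    have hstep : ∀ k : Nat, (a :: b :: t)[1 + 2 * (k + 1)]? = t[1 + 2 * k]? := by
      intro k
      have : 1 + 2 * (k + 1) = (1 + 2 * k) + 2 := by omega
      simp [this, List.getElem?_cons_succ]
    simp only [Nat.mul_zero, Nat.add_zero, h0]
    rw [pvOdd, ← ih]
    exact congrArg (b :: ·) (List.filterMap_congr (fun k _ => hstep k))

theorem pvSliceOdd {α : Type} (xs : List α) :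
    PySem.List.slice? xs (some 1) none 2 = some (pvOdd xs) := by
  rw [← pvRangeOdd]
  simp only [PySem.List.slice?, PySem.List.sliceIndices]
  norm_num
  rcases xs with _ | ⟨a, t⟩
  · simp
  · have h1 : min (1 : Int) ((a :: t).length : Int) = 1 := by
      simp [List.length]
    rw [h1]
    have hcount : (if 1 < (a :: t).length then
        ((((a :: t).length : Int) - 1 + 2 - 1) / 2).toNat else 0) = (a :: t).length / 2 := by
      split_ifs with h <;> omega
    rw [hcount]
    apply List.filterMap_congr
    intro k _
    have hk : ((1 : Int) + 2 * (k : Int)).toNat = 1 + 2 * k := by omega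
    rw [hk]

theorem zwroc_eq (napis : String) :
    zwroc_napis_z_samoglosek_na_parzystych napis = zwroc_napis_z_samoglosek_na_parzystych_alt napis := by
  unfold zwroc_napis_z_samoglosek_na_parzystych zwroc_napis_z_samoglosek_na_parzystych_alt
  have hA := pvFoldA napis.toList 0 [] (by norm_num)
  simp only [hA, List.nil_append]
  have hcz : czy_samogloska = (fun c => PySem.Str.isIn (String.ofList [c]) "aeiouyąęAEIOUYĄĘ") := by
    funext c; simp [czy_samogloska]
  rw [hcz]
  have hB : PySem.Str.slice? napis (some 1) none 2 = some (String.ofList (pvOdd napis.toList)) := by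
    have := pvSliceOdd napis.toList
    simp [PySem.Str.slice?, this]
  rw [hB]
  simp only [Option.getD_some, String.toList_ofList]

-- ===== VERDICT (by name: the statement is the Claim_ definition above) =====
theorem zwroc_napis_z_samoglosek_na_parzystych_spec : Claim_equal_zwroc_napis_z_samoglosek_na_parzystych := by
  intro napis _
  unfold Spec_zwroc_napis_z_samoglosek_na_parzystych
  exact zwroc_eq napis
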